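-- pv_equiv track=rewrite | github.com/dawaltconley/conceptual-misalignment | parse_classical_chinese.py | keyword_in_context
-- ===== SOURCE A (Python) =====
-- def keyword_in_context(text, term, window=30):
--     results = []
--     idx = 0
--     while True:
--         pos = text.find(term, idx)
--         if pos == -1:
--             break
--         pre = text[max(0, pos - window):pos]
--         post = text[pos + len(term): pos + len(term) + window]
--         results.append((pre, term, post))
--         idx = pos + 1
--     return results
-- ===== SOURCE B (Python) =====
-- def keyword_in_context(text, term, window=30):
--     positions = [i for i in range(len(text) + 1) if text.startswith(term, i)]
--     m = len(term)
--     return [(text[max(0, p - window):p], term, text[p + m:p + m + window])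
--             for p in positions]
-- ===== Notes on version B (the rewrite author's own statement) =====
-- stated objective: alternative
-- what changed: Replaces A's str.find jump-loop (advance idx to each found position + 1) with two separate passes: a startswith scan over every start index 0..len(text) collecting all match positions, then a map turning each position into its (pre, term, post) context tuple.
import Mathlib
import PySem

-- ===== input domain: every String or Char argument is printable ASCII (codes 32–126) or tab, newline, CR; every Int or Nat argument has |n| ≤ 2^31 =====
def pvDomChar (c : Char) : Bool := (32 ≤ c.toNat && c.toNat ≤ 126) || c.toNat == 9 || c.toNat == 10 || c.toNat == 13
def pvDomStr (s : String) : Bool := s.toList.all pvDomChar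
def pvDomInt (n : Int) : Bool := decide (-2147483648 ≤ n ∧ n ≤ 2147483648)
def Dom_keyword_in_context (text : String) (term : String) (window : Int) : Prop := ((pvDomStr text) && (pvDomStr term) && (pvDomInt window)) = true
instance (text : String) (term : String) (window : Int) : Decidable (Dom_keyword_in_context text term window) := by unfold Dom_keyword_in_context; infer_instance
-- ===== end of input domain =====

-- B replaces A's str.find jump-loop with two passes — collect all match start positions by a startswith scan, then map each position to its context tuple (objective: alternative decomposition, same cost).

-- ===== PORT A =====
-- A's 'while True' loop: fuel = len(text)+2 bounds the iteration count (idx strictly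
-- increases and stops past len(text)); each step is a literal transcription of the body.
def keyword_in_contextLoop (tl tm : List Char) (termS : String) (window : Int) :
    Nat → Nat → List (String × String × String) → List (String × String × String)
  | 0, _, acc => acc
  | fuel + 1, idx, acc =>
    let pos := PySem.Chars.findFrom tl tm (idx : Int)
    if pos = -1 then acc
    else
      let pre := String.ofList (PySem.List.slice tl (some (max 0 (pos - window))) (some pos))
      let post := String.ofList (PySem.List.slice tl (some (pos + (tm.length : Int))) (some (pos + (tm.length : Int) + window)))
      keyword_in_contextLoop tl tm termS window fuel (pos.toNat + 1) (acc ++ [(pre, termS, post)])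

def keyword_in_context (text : String) (term : String) (window : Int) : List (String × String × String) :=
  keyword_in_contextLoop text.toList term.toList term window (text.toList.length + 2) 0 []

-- ===== PORT B =====
def keyword_in_context_alt (text : String) (term : String) (window : Int) : List (String × String × String) :=
  let tl := text.toList
  let positions := (List.range (tl.length + 1)).filter (fun i => PySem.Chars.startswith (List.drop i tl) term.toList)
  let m := term.toList.length
  positions.map (fun p =>
    (String.ofList (PySem.List.slice tl (some (max 0 ((p : Int) - window))) (some (p : Int))),
     term,
     String.ofList (PySem.List.slice tl (some ((p : Int) + (m : Int))) (some ((p : Int) + (m : Int) + window)))))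

-- ===== PRECONDITION & SPEC =====
def Spec_keyword_in_context (text : String) (term : String) (window : Int) (out : List (String × String × String)) : Prop := out = keyword_in_context_alt text term window
instance (text : String) (term : String) (window : Int) (out : List (String × String × String)) : Decidable (Spec_keyword_in_context text term window out) := by unfold Spec_keyword_in_context; infer_instance

-- ===== CLAIM (what is proved, stated in full; the proofs are below) =====
def Claim_equal_keyword_in_context : Prop := ∀ (text : String) (term : String) (window : Int), Dom_keyword_in_context text term window → Spec_keyword_in_context text term window (keyword_in_context text term window)

-- ===== LEMMAS AND PROOFS =====

-- Python's str.find(sub, start) returns -1 when start is past the end of the string.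
theorem pvFindFrom_past (s sub : List Char) (k : Nat) (h : s.length < k) :
    PySem.Chars.findFrom s sub (k : Int) = -1 := by
  simp only [PySem.Chars.findFrom]
  split_ifs with h1 h2 h3 h4 <;> omega

-- Splitting the filtered position list at the least occurrence ≥ idx.
theorem pvFilter_split (n p idx : Nat) (occ : Nat → Bool) (hp : p ≤ n) (hidx : idx ≤ p)
    (hop : occ p = true) (hmin : ∀ i, idx ≤ i → i < p → occ i = false) :
    (List.range (n + 1)).filter (fun i => decide (idx ≤ i) && occ i)
      = p :: (List.range (n + 1)).filter (fun i => decide (p + 1 ≤ i) && occ i) := by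
  have hsplit : n + 1 = (p + 1) + (n - p) := by omega
  rw [hsplit, List.range_add, List.filter_append, List.filter_append]
  have h1 : (List.range (p + 1)).filter (fun i => decide (idx ≤ i) && occ i) = [p] := by
    rw [List.range_succ, List.filter_append]
    have : (List.range p).filter (fun i => decide (idx ≤ i) && occ i) = [] := by
      apply List.filter_eq_nil_iff.mpr
      intro i hi
      have hi' : i < p := List.mem_range.mp hi
      by_cases hle : idx ≤ i
      · simp [hmin i hle hi']
      · simp [hle]
    simp [this, hidx, hop]
  have h2 : (List.range (p + 1)).filter (fun i => decide (p + 1 ≤ i) && occ i) = [] := by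
    apply List.filter_eq_nil_iff.mpr
    intro i hi
    have : i < p + 1 := List.mem_range.mp hi
    simp; omega
  have h3 : ((List.range (n - p)).map (fun i => p + 1 + i)).filter (fun i => decide (idx ≤ i) && occ i)
      = ((List.range (n - p)).map (fun i => p + 1 + i)).filter (fun i => decide (p + 1 ≤ i) && occ i) := by
    apply List.filter_congr
    intro i hi
    rcases List.mem_map.mp hi with ⟨j, _, rfl⟩
    have hle : idx ≤ p + 1 + j := by omega
    have hle' : p + 1 ≤ p + 1 + j := by omega
    simp [hle, hle']
  rw [h1, h2, h3]
  simp

-- A's loop, started at idx with accumulator acc, appends exactly the tuples for all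
-- match positions ≥ idx, in increasing order.
theorem pvLoop_eq (tl tm : List Char) (termS : String) (window : Int) :
    ∀ (fuel idx : Nat) (acc : List (String × String × String)),
      idx ≤ tl.length + 1 → tl.length + 2 ≤ fuel + idx →
      keyword_in_contextLoop tl tm termS window fuel idx acc =
        acc ++ ((List.range (tl.length + 1)).filter
            (fun i => decide (idx ≤ i) && PySem.Chars.startswith (List.drop i tl) tm)).map
          (fun p =>
            (String.ofList (PySem.List.slice tl (some (max 0 ((p : Int) - window))) (some (p : Int))),
             termS,
             String.ofList (PySem.List.slice tl (some ((p : Int) + (tm.length : Int))) (some ((p : Int) + (tm.length : Int) + window))))) := by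
  intro fuel
  induction fuel with
  | zero => intro idx acc h1 h2; omega
  | succ fuel ih =>
    intro idx acc hidx hfuel
    rw [keyword_in_contextLoop]
    by_cases hpos : PySem.Chars.findFrom tl tm (idx : Int) = -1
    · simp only [hpos]
      have hfilter : (List.range (tl.length + 1)).filter
          (fun i => decide (idx ≤ i) && PySem.Chars.startswith (List.drop i tl) tm) = [] := by
        apply List.filter_eq_nil_iff.mpr
        intro i hi
        have hi' : i < tl.length + 1 := List.mem_range.mp hi
        by_cases hle : idx ≤ i
        · -- idx ≤ i ≤ length; no occurrence at i since term not infix of drop idx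
          have hidx' : idx ≤ tl.length := by
            by_contra hgt
            have : idx = tl.length + 1 := by omega
            omega
          have hninf : ¬ tm <:+: List.drop idx tl :=
            (PySem.Chars.findFrom_natCast_eq_neg_one_iff tl tm idx hidx').mp hpos
          have hnpre : ¬ PySem.Chars.startswith (List.drop i tl) tm = true := by
            intro hsw
            have hpre : tm <+: List.drop i tl := (PySem.Chars.startswith_iff _ _).mp hsw
            have hdd : List.drop i tl = List.drop (i - idx) (List.drop idx tl) := by
              rw [List.drop_drop]; congr 1; omega
            apply hninf
            rw [hdd] at hpre
            exact hpre.isInfix.trans (List.drop_suffix _ _).isInfix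
          simp [hnpre]
        · simp [hle]
      simp [hfilter]
    · simp only [if_neg hpos]
      -- A match was found: extract its properties
      have hidx' : idx ≤ tl.length := by
        by_contra hgt
        exact hpos (pvFindFrom_past tl tm idx (by omega))
      obtain ⟨hge, hpre, hmin⟩ := PySem.Chars.findFrom_natCast_spec tl tm idx hidx' hpos
      set pos := PySem.Chars.findFrom tl tm (idx : Int) with hposdef
      have hpos0 : 0 ≤ pos := le_trans (by exact_mod_cast Int.natCast_nonneg idx) hge
      -- pos ≤ length: pos = idx + find (drop idx tl) tm and find ≤ length of the drop
      have hle : pos ≤ (tl.length : Int) := by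
        have hff := PySem.Chars.findFrom_natCast tl tm idx hidx'
        rw [← hposdef] at hff
        by_cases hf : PySem.Chars.find (List.drop idx tl) tm = -1
        · rw [hff, if_pos hf] at hpos; exact absurd rfl hpos
        · rw [hff, if_neg hf]
          have := PySem.Chars.find_le_length (List.drop idx tl) tm
          rw [List.length_drop] at this
          omega
      set p := pos.toNat with hpdef
      have hposp : pos = (p : Int) := by omega
      have hpn : p ≤ tl.length := by omega
      have hgep : idx ≤ p := by omega
      rw [ih (p + 1) _ (by omega) (by omega)]
      rw [pvFilter_split tl.length p idx
            (fun i => PySem.Chars.startswith (List.drop i tl) tm) hpn hgep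
            ((PySem.Chars.startswith_iff _ _).mpr hpre)
            (fun i h1 h2 => by
              rcases Bool.eq_false_or_eq_true (PySem.Chars.startswith (List.drop i tl) tm) with h | h
              · exact absurd ((PySem.Chars.startswith_iff (List.drop i tl) tm).mp h) (hmin i h1 h2)
              · exact h)]
      rw [hposp]
      simp

theorem keyword_in_context_eq (text term : String) (window : Int) :
    keyword_in_context text term window = keyword_in_context_alt text term window := by
  unfold keyword_in_context keyword_in_context_alt
  rw [pvLoop_eq text.toList term.toList term window (text.toList.length + 2) 0 [] (by omega) (by omega)]
  simp

-- ===== VERDICT (by name: the statement is the Claim_ definition above) =====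
theorem keyword_in_context_spec : Claim_equal_keyword_in_context := by
  intro text term window _
  unfold Spec_keyword_in_context
  exact keyword_in_context_eq text term window
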